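-- pv_equiv track=rewrite | github.com/cskerritt/sports-edge | markets/kalshi.py | _infer_sport_from_ticker
-- ===== SOURCE A (Python) =====
-- GAME_SERIES: dict[str, str] = {
--     "KXMLBGAME": "MLB",
--     "KXNBAGAME": "NBA",
--     "KXNFLGAME": "NFL",
--     "KXNHLGAME": "NHL",
-- }
--
-- SPORT_SERIES_EXTRA: dict[str, str] = {
--     "KXMLB": "MLB",
--     "KXNBA": "NBA",
--     "KXNFL": "NFL",
--     "KXNHL": "NHL",
-- }
--
-- def _infer_sport_from_ticker(ticker: str) -> str:
--     """Return sport code from a series or event ticker, or '' if unknown."""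
--     upper = ticker.upper()
--     for prefix, sport in GAME_SERIES.items():
--         if upper.startswith(prefix):
--             return sport
--     for prefix, sport in SPORT_SERIES_EXTRA.items():
--         if upper.startswith(prefix):
--             return sport
--     return ""
-- ===== SOURCE B (Python) =====
-- SERIES = {"KXMLB": "MLB", "KXNBA": "NBA", "KXNFL": "NFL", "KXNHL": "NHL"}
--
--
-- def _infer_sport_from_ticker(ticker: str) -> str:
--     """Return sport code from a series or event ticker, or '' if unknown."""
--     return SERIES.get(ticker.upper()[:5], "")
-- ===== Notes on version B (the rewrite author's own statement) =====
-- stated objective: simpler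
-- what changed: Replaces A's two sequential startswith scans over two dicts with a single dict lookup keyed on the first five uppercased characters, exploiting that every GAME_SERIES key extends the matching SPORT_SERIES_EXTRA key and maps to the same sport.
import Mathlib
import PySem

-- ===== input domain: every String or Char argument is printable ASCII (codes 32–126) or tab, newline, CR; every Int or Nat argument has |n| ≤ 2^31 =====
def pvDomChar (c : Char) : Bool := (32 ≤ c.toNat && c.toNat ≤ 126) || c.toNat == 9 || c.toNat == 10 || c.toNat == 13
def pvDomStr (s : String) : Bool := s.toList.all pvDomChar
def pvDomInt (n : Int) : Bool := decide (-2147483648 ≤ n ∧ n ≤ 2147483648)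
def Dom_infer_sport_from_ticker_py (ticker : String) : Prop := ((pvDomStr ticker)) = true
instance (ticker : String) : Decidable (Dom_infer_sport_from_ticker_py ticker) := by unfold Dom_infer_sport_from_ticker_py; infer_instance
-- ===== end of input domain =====

-- B replaces A's two sequential startswith scans with a single dict lookup keyed on the
-- first five uppercased characters (objective: simpler; same behaviour, proved below).

-- ===== PORT A =====
def pvGameSeries : List (String × String) :=
  [("KXMLBGAME", "MLB"), ("KXNBAGAME", "NBA"), ("KXNFLGAME", "NFL"), ("KXNHLGAME", "NHL")]

def pvSportSeriesExtra : List (String × String) :=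
  [("KXMLB", "MLB"), ("KXNBA", "NBA"), ("KXNFL", "NFL"), ("KXNHL", "NHL")]

-- the 'for prefix, sport in d.items(): if upper.startswith(prefix): return sport' loop
def pvScanSeries (upper : String) : List (String × String) → Option String
  | [] => none
  | (p, s) :: rest => if PySem.Str.startswith upper p then some s else pvScanSeries upper rest

def infer_sport_from_ticker_py (ticker : String) : String :=
  let upper := PySem.Str.upper ticker
  match pvScanSeries upper pvGameSeries with
  | some s => s
  | none =>
    match pvScanSeries upper pvSportSeriesExtra with
    | some s => s
    | none => ""

-- ===== PORT B =====
def pvSeriesDict : PySem.Dict String String :=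
  PySem.Dict.mk [("KXMLB", "MLB"), ("KXNBA", "NBA"), ("KXNFL", "NFL"), ("KXNHL", "NHL")]

def infer_sport_from_ticker_py_alt (ticker : String) : String :=
  pvSeriesDict.getD (PySem.Str.slice (PySem.Str.upper ticker) none (some 5)) ""

-- ===== PRECONDITION & SPEC =====
def Spec_infer_sport_from_ticker_py (ticker : String) (out : String) : Prop := out = infer_sport_from_ticker_py_alt ticker
instance (ticker : String) (out : String) : Decidable (Spec_infer_sport_from_ticker_py ticker out) := by unfold Spec_infer_sport_from_ticker_py; infer_instance

-- ===== CLAIM (what is proved, stated in full; the proofs are below) =====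
def Claim_equal_infer_sport_from_ticker_py : Prop := ∀ (ticker : String), Dom_infer_sport_from_ticker_py ticker → Spec_infer_sport_from_ticker_py ticker (infer_sport_from_ticker_py ticker)

-- ===== LEMMAS AND PROOFS =====
lemma pv_sw_true {l p : List Char} (h : p <+: l) : PySem.Chars.startswith l p = true :=
  (PySem.Chars.startswith_iff l p).mpr h
lemma pv_sw_false {l p : List Char} (h : ¬ p <+: l) : PySem.Chars.startswith l p = false := by
  rw [Bool.eq_false_iff]; intro hc; exact h ((PySem.Chars.startswith_iff l p).mp hc)
lemma pv_key_prefix_iff (l key : List Char) (h5 : key.length = 5) : key <+: l ↔ l.take 5 = key := by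
  constructor
  · intro h
    have h2 := List.prefix_iff_eq_take.mp h
    rw [h5] at h2
    exact h2.symm
  · intro h
    exact h ▸ List.take_prefix 5 l

lemma pv_main (u : String) :
    (match pvScanSeries u pvGameSeries with
     | some s => s
     | none =>
       match pvScanSeries u pvSportSeriesExtra with
       | some s => s
       | none => "") = pvSeriesDict.getD (PySem.Str.slice u none (some 5)) "" := by
  have hk : (PySem.Str.slice u none (some 5)).toList = u.toList.take 5 := by simp [pysem]
  set k := PySem.Str.slice u none (some 5) with hkdef
  by_cases e1 : ['K', 'X', 'M', 'L', 'B'] <+: u.toList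
  · have ht : u.toList.take 5 = ['K', 'X', 'M', 'L', 'B'] := (pv_key_prefix_iff _ _ (by decide)).mp e1
    have hke : k = "KXMLB" := String.toList_inj.mp (by rw [hk, ht]; decide)
    have hg2 : ¬ ['K', 'X', 'N', 'B', 'A', 'G', 'A', 'M', 'E'] <+: u.toList := by
      intro h
      have hpj := (pv_key_prefix_iff u.toList ['K', 'X', 'N', 'B', 'A'] (by decide)).mp (List.IsPrefix.trans (by decide) h)
      rw [ht] at hpj; exact absurd hpj (by decide)
    have hg3 : ¬ ['K', 'X', 'N', 'F', 'L', 'G', 'A', 'M', 'E'] <+: u.toList := by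
      intro h
      have hpj := (pv_key_prefix_iff u.toList ['K', 'X', 'N', 'F', 'L'] (by decide)).mp (List.IsPrefix.trans (by decide) h)
      rw [ht] at hpj; exact absurd hpj (by decide)
    have hg4 : ¬ ['K', 'X', 'N', 'H', 'L', 'G', 'A', 'M', 'E'] <+: u.toList := by
      intro h
      have hpj := (pv_key_prefix_iff u.toList ['K', 'X', 'N', 'H', 'L'] (by decide)).mp (List.IsPrefix.trans (by decide) h)
      rw [ht] at hpj; exact absurd hpj (by decide)
    by_cases g1 : ['K', 'X', 'M', 'L', 'B', 'G', 'A', 'M', 'E'] <+: u.toList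
    · simp [pvScanSeries, pvGameSeries, pvSportSeriesExtra, pvSeriesDict, PySem.Dict.getD, PySem.Dict.get?_mk_cons, hke, pv_sw_false hg2, pv_sw_false hg3, pv_sw_false hg4, pv_sw_true g1]
    · simp [pvScanSeries, pvGameSeries, pvSportSeriesExtra, pvSeriesDict, PySem.Dict.getD, PySem.Dict.get?_mk_cons, hke, pv_sw_false hg2, pv_sw_false hg3, pv_sw_false hg4, pv_sw_false g1, pv_sw_true e1]
  ·
    by_cases e2 : ['K', 'X', 'N', 'B', 'A'] <+: u.toList
    · have ht : u.toList.take 5 = ['K', 'X', 'N', 'B', 'A'] := (pv_key_prefix_iff _ _ (by decide)).mp e2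
      have hke : k = "KXNBA" := String.toList_inj.mp (by rw [hk, ht]; decide)
      have hg1 : ¬ ['K', 'X', 'M', 'L', 'B', 'G', 'A', 'M', 'E'] <+: u.toList := by
        intro h
        have hpj := (pv_key_prefix_iff u.toList ['K', 'X', 'M', 'L', 'B'] (by decide)).mp (List.IsPrefix.trans (by decide) h)
        rw [ht] at hpj; exact absurd hpj (by decide)
      have hg3 : ¬ ['K', 'X', 'N', 'F', 'L', 'G', 'A', 'M', 'E'] <+: u.toList := by
        intro h
        have hpj := (pv_key_prefix_iff u.toList ['K', 'X', 'N', 'F', 'L'] (by decide)).mp (List.IsPrefix.trans (by decide) h)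
        rw [ht] at hpj; exact absurd hpj (by decide)
      have hg4 : ¬ ['K', 'X', 'N', 'H', 'L', 'G', 'A', 'M', 'E'] <+: u.toList := by
        intro h
        have hpj := (pv_key_prefix_iff u.toList ['K', 'X', 'N', 'H', 'L'] (by decide)).mp (List.IsPrefix.trans (by decide) h)
        rw [ht] at hpj; exact absurd hpj (by decide)
      have he1 : ¬ ['K', 'X', 'M', 'L', 'B'] <+: u.toList := by
        intro h
        have hpj := (pv_key_prefix_iff u.toList ['K', 'X', 'M', 'L', 'B'] (by decide)).mp h
        rw [ht] at hpj; exact absurd hpj (by decide)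
      by_cases g2 : ['K', 'X', 'N', 'B', 'A', 'G', 'A', 'M', 'E'] <+: u.toList
      · simp [pvScanSeries, pvGameSeries, pvSportSeriesExtra, pvSeriesDict, PySem.Dict.getD, PySem.Dict.get?_mk_cons, hke, pv_sw_false hg1, pv_sw_false hg3, pv_sw_false hg4, pv_sw_true g2]
      · simp [pvScanSeries, pvGameSeries, pvSportSeriesExtra, pvSeriesDict, PySem.Dict.getD, PySem.Dict.get?_mk_cons, hke, pv_sw_false hg1, pv_sw_false hg3, pv_sw_false hg4, pv_sw_false g2, pv_sw_false he1, pv_sw_true e2]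
    ·
      by_cases e3 : ['K', 'X', 'N', 'F', 'L'] <+: u.toList
      · have ht : u.toList.take 5 = ['K', 'X', 'N', 'F', 'L'] := (pv_key_prefix_iff _ _ (by decide)).mp e3
        have hke : k = "KXNFL" := String.toList_inj.mp (by rw [hk, ht]; decide)
        have hg1 : ¬ ['K', 'X', 'M', 'L', 'B', 'G', 'A', 'M', 'E'] <+: u.toList := by
          intro h
          have hpj := (pv_key_prefix_iff u.toList ['K', 'X', 'M', 'L', 'B'] (by decide)).mp (List.IsPrefix.trans (by decide) h)
          rw [ht] at hpj; exact absurd hpj (by decide)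
        have hg2 : ¬ ['K', 'X', 'N', 'B', 'A', 'G', 'A', 'M', 'E'] <+: u.toList := by
          intro h
          have hpj := (pv_key_prefix_iff u.toList ['K', 'X', 'N', 'B', 'A'] (by decide)).mp (List.IsPrefix.trans (by decide) h)
          rw [ht] at hpj; exact absurd hpj (by decide)
        have hg4 : ¬ ['K', 'X', 'N', 'H', 'L', 'G', 'A', 'M', 'E'] <+: u.toList := by
          intro h
          have hpj := (pv_key_prefix_iff u.toList ['K', 'X', 'N', 'H', 'L'] (by decide)).mp (List.IsPrefix.trans (by decide) h)
          rw [ht] at hpj; exact absurd hpj (by decide)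
        have he1 : ¬ ['K', 'X', 'M', 'L', 'B'] <+: u.toList := by
          intro h
          have hpj := (pv_key_prefix_iff u.toList ['K', 'X', 'M', 'L', 'B'] (by decide)).mp h
          rw [ht] at hpj; exact absurd hpj (by decide)
        have he2 : ¬ ['K', 'X', 'N', 'B', 'A'] <+: u.toList := by
          intro h
          have hpj := (pv_key_prefix_iff u.toList ['K', 'X', 'N', 'B', 'A'] (by decide)).mp h
          rw [ht] at hpj; exact absurd hpj (by decide)
        by_cases g3 : ['K', 'X', 'N', 'F', 'L', 'G', 'A', 'M', 'E'] <+: u.toList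
        · simp [pvScanSeries, pvGameSeries, pvSportSeriesExtra, pvSeriesDict, PySem.Dict.getD, PySem.Dict.get?_mk_cons, hke, pv_sw_false hg1, pv_sw_false hg2, pv_sw_false hg4, pv_sw_true g3]
        · simp [pvScanSeries, pvGameSeries, pvSportSeriesExtra, pvSeriesDict, PySem.Dict.getD, PySem.Dict.get?_mk_cons, hke, pv_sw_false hg1, pv_sw_false hg2, pv_sw_false hg4, pv_sw_false g3, pv_sw_false he1, pv_sw_false he2, pv_sw_true e3]
      ·
        by_cases e4 : ['K', 'X', 'N', 'H', 'L'] <+: u.toList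
        · have ht : u.toList.take 5 = ['K', 'X', 'N', 'H', 'L'] := (pv_key_prefix_iff _ _ (by decide)).mp e4
          have hke : k = "KXNHL" := String.toList_inj.mp (by rw [hk, ht]; decide)
          have hg1 : ¬ ['K', 'X', 'M', 'L', 'B', 'G', 'A', 'M', 'E'] <+: u.toList := by
            intro h
            have hpj := (pv_key_prefix_iff u.toList ['K', 'X', 'M', 'L', 'B'] (by decide)).mp (List.IsPrefix.trans (by decide) h)
            rw [ht] at hpj; exact absurd hpj (by decide)
          have hg2 : ¬ ['K', 'X', 'N', 'B', 'A', 'G', 'A', 'M', 'E'] <+: u.toList := by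
            intro h
            have hpj := (pv_key_prefix_iff u.toList ['K', 'X', 'N', 'B', 'A'] (by decide)).mp (List.IsPrefix.trans (by decide) h)
            rw [ht] at hpj; exact absurd hpj (by decide)
          have hg3 : ¬ ['K', 'X', 'N', 'F', 'L', 'G', 'A', 'M', 'E'] <+: u.toList := by
            intro h
            have hpj := (pv_key_prefix_iff u.toList ['K', 'X', 'N', 'F', 'L'] (by decide)).mp (List.IsPrefix.trans (by decide) h)
            rw [ht] at hpj; exact absurd hpj (by decide)
          have he1 : ¬ ['K', 'X', 'M', 'L', 'B'] <+: u.toList := by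
            intro h
            have hpj := (pv_key_prefix_iff u.toList ['K', 'X', 'M', 'L', 'B'] (by decide)).mp h
            rw [ht] at hpj; exact absurd hpj (by decide)
          have he2 : ¬ ['K', 'X', 'N', 'B', 'A'] <+: u.toList := by
            intro h
            have hpj := (pv_key_prefix_iff u.toList ['K', 'X', 'N', 'B', 'A'] (by decide)).mp h
            rw [ht] at hpj; exact absurd hpj (by decide)
          have he3 : ¬ ['K', 'X', 'N', 'F', 'L'] <+: u.toList := by
            intro h
            have hpj := (pv_key_prefix_iff u.toList ['K', 'X', 'N', 'F', 'L'] (by decide)).mp h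
            rw [ht] at hpj; exact absurd hpj (by decide)
          by_cases g4 : ['K', 'X', 'N', 'H', 'L', 'G', 'A', 'M', 'E'] <+: u.toList
          · simp [pvScanSeries, pvGameSeries, pvSportSeriesExtra, pvSeriesDict, PySem.Dict.getD, PySem.Dict.get?_mk_cons, hke, pv_sw_false hg1, pv_sw_false hg2, pv_sw_false hg3, pv_sw_true g4]
          · simp [pvScanSeries, pvGameSeries, pvSportSeriesExtra, pvSeriesDict, PySem.Dict.getD, PySem.Dict.get?_mk_cons, hke, pv_sw_false hg1, pv_sw_false hg2, pv_sw_false hg3, pv_sw_false g4, pv_sw_false he1, pv_sw_false he2, pv_sw_false he3, pv_sw_true e4]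
        ·
          have hg1 : ¬ ['K', 'X', 'M', 'L', 'B', 'G', 'A', 'M', 'E'] <+: u.toList := fun h => e1 (List.IsPrefix.trans (by decide) h)
          have hg2 : ¬ ['K', 'X', 'N', 'B', 'A', 'G', 'A', 'M', 'E'] <+: u.toList := fun h => e2 (List.IsPrefix.trans (by decide) h)
          have hg3 : ¬ ['K', 'X', 'N', 'F', 'L', 'G', 'A', 'M', 'E'] <+: u.toList := fun h => e3 (List.IsPrefix.trans (by decide) h)
          have hg4 : ¬ ['K', 'X', 'N', 'H', 'L', 'G', 'A', 'M', 'E'] <+: u.toList := fun h => e4 (List.IsPrefix.trans (by decide) h)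
          have hne1 : (("KXMLB" : String) == k) = false := by
            rw [beq_eq_false_iff_ne]
            intro hEq
            exact e1 ((pv_key_prefix_iff u.toList ['K', 'X', 'M', 'L', 'B'] (by decide)).mpr (by rw [← hk, ← hEq]; decide))
          have hne2 : (("KXNBA" : String) == k) = false := by
            rw [beq_eq_false_iff_ne]
            intro hEq
            exact e2 ((pv_key_prefix_iff u.toList ['K', 'X', 'N', 'B', 'A'] (by decide)).mpr (by rw [← hk, ← hEq]; decide))
          have hne3 : (("KXNFL" : String) == k) = false := by
            rw [beq_eq_false_iff_ne]
            intro hEq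
            exact e3 ((pv_key_prefix_iff u.toList ['K', 'X', 'N', 'F', 'L'] (by decide)).mpr (by rw [← hk, ← hEq]; decide))
          have hne4 : (("KXNHL" : String) == k) = false := by
            rw [beq_eq_false_iff_ne]
            intro hEq
            exact e4 ((pv_key_prefix_iff u.toList ['K', 'X', 'N', 'H', 'L'] (by decide)).mpr (by rw [← hk, ← hEq]; decide))
          simp [PySem.Dict.get?, pvScanSeries, pvGameSeries, pvSportSeriesExtra, pvSeriesDict, PySem.Dict.getD, PySem.Dict.get?_mk_cons, pv_sw_false hg1, pv_sw_false hg2, pv_sw_false hg3, pv_sw_false hg4, pv_sw_false e1, pv_sw_false e2, pv_sw_false e3, pv_sw_false e4, hne1, hne2, hne3, hne4]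

-- ===== VERDICT (by name: the statement is the Claim_ definition above) =====
theorem infer_sport_from_ticker_py_spec : Claim_equal_infer_sport_from_ticker_py := by
  intro ticker _
  unfold Spec_infer_sport_from_ticker_py infer_sport_from_ticker_py infer_sport_from_ticker_py_alt
  exact pv_main (PySem.Str.upper ticker)
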